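-- pv_equiv track=rewrite | github.com/kiwibrowser/src | third_party/blink/tools/blinkpy/web_tests/models/testharness_results.py | is_testharness_output_passing
-- ===== SOURCE A (Python) =====
-- def is_testharness_output_passing(content_text):
--     """Checks whether |content_text| is a passing testharness output.
--
--     Under a relatively loose/accepting definition of passing
--     testharness output, we consider any output with at least one
--     PASS result and no FAIL result (or TIMEOUT or NOTRUN).
--     """
--     # Leading and trailing whitespace are ignored.
--     lines = content_text.strip().splitlines()
--     lines = [line.strip() for line in lines]
--
--     at_least_one_pass = False
--
--     for line in lines:
--         if line.startswith('PASS'):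
--             at_least_one_pass = True
--             continue
--         if (line.startswith('FAIL') or
--                 line.startswith('TIMEOUT') or
--                 line.startswith('NOTRUN') or
--                 line.startswith('Harness Error.')):
--             return False
--
--     return at_least_one_pass
-- ===== SOURCE B (Python) =====
-- def is_testharness_output_passing(content_text):
--     """Same check as A, decomposed into two independent predicate scans."""
--     lines = [line.strip() for line in content_text.strip().splitlines()]
--     has_pass = any(line.startswith('PASS') for line in lines)
--     has_fail = any(line.startswith(('FAIL', 'TIMEOUT', 'NOTRUN', 'Harness Error.'))
--                    for line in lines)
--     return has_pass and not has_fail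
-- ===== Notes on version B (the rewrite author's own statement) =====
-- stated objective: simpler
-- what changed: Replaced the single flag-carrying loop with early return by two independent any() scans (has_pass and no fail-type line), which is valid because a PASS-prefixed line can never also be a fail-prefixed line.
import Mathlib
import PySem

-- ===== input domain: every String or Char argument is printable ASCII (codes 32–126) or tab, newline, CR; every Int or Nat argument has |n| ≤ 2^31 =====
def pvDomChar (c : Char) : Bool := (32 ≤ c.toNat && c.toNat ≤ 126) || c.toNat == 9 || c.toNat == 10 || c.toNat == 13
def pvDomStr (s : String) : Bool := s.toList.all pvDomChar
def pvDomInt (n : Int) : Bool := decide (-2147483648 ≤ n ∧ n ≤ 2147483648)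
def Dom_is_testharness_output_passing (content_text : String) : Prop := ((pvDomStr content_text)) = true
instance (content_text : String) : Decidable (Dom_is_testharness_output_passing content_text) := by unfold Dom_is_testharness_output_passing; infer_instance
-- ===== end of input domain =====

-- B replaces A's single flag-carrying loop with early return by two independent
-- any-scans (has a PASS line, has no fail-type line); objective: simpler.

-- ===== PORT A =====
-- shared prefix tests: line.startswith('PASS') and the fail-prefix test both Pythons use
def pvIsPass (l : String) : Bool := PySem.Str.startswith l "PASS"
def pvIsFail (l : String) : Bool :=
  PySem.Str.startswith l "FAIL" || PySem.Str.startswith l "TIMEOUT" ||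
  PySem.Str.startswith l "NOTRUN" || PySem.Str.startswith l "Harness Error."

-- A's for-loop with its mutable flag and early return, as structural recursion.
def pvLoopA (acc : Bool) : List String → Bool
  | [] => acc
  | l :: ls =>
    if pvIsPass l then pvLoopA true ls
    else if pvIsFail l then false
    else pvLoopA acc ls

def is_testharness_output_passing (content_text : String) : Bool :=
  let lines := PySem.Str.splitlines (PySem.Str.strip content_text)
  let lines := lines.map PySem.Str.strip
  pvLoopA false lines

-- ===== PORT B =====
def is_testharness_output_passing_alt (content_text : String) : Bool :=
  let lines := (PySem.Str.splitlines (PySem.Str.strip content_text)).map PySem.Str.strip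
  let has_pass := lines.any (fun line => pvIsPass line)
  let has_fail := lines.any (fun line => pvIsFail line)
  has_pass && !has_fail

-- ===== PRECONDITION & SPEC =====
def Spec_is_testharness_output_passing (content_text : String) (out : Bool) : Prop := out = is_testharness_output_passing_alt content_text
instance (content_text : String) (out : Bool) : Decidable (Spec_is_testharness_output_passing content_text out) := by unfold Spec_is_testharness_output_passing; infer_instance

-- ===== CLAIM (what is proved, stated in full; the proofs are below) =====
def Claim_equal_is_testharness_output_passing : Prop := ∀ (content_text : String), Dom_is_testharness_output_passing content_text → Spec_is_testharness_output_passing content_text (is_testharness_output_passing content_text)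

-- ===== LEMMAS AND PROOFS =====

-- A line starting with "PASS" cannot also start with any of the fail prefixes.
theorem pass_not_fail (l : String) (h : pvIsPass l = true) : pvIsFail l = false := by
  unfold pvIsPass at h
  simp only [PySem.Str.startswith_eq, PySem.Chars.startswith_iff] at h
  obtain ⟨t, ht⟩ := h
  unfold pvIsFail
  simp only [PySem.Str.startswith_eq, Bool.or_eq_false_iff]
  refine ⟨⟨⟨?_, ?_⟩, ?_⟩, ?_⟩ <;>
  · rw [Bool.eq_false_iff]
    rw [Ne, PySem.Chars.startswith_iff]
    rintro ⟨u, hu⟩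
    rw [← ht] at hu
    simp at hu

-- Characterisation of A's loop by B's two scans.
theorem pvLoopA_eq (ls : List String) (acc : Bool) :
    pvLoopA acc ls = ((acc || ls.any (fun line => pvIsPass line)) &&
                      !ls.any (fun line => pvIsFail line)) := by
  induction ls generalizing acc with
  | nil => simp [pvLoopA]
  | cons l ls ih =>
    simp only [pvLoopA, List.any_cons]
    by_cases hp : pvIsPass l = true
    · simp [hp, pass_not_fail l hp, ih]
    · simp only [Bool.not_eq_true] at hp
      by_cases hf : pvIsFail l = true
      · simp [hp, hf]
      · simp only [Bool.not_eq_true] at hf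
        simp [hp, hf, ih]

-- ===== VERDICT (by name: the statement is the Claim_ definition above) =====
theorem is_testharness_output_passing_spec : Claim_equal_is_testharness_output_passing := by
  intro content_text _
  unfold Spec_is_testharness_output_passing is_testharness_output_passing is_testharness_output_passing_alt
  simp [pvLoopA_eq]
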